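-- pv_equiv track=rewrite | github.com/daibiaoxuwu/pinyin | list3.py | listtags
-- ===== SOURCE A (Python) =====
-- def listtags(text,smdict):
--     for i in range(0,len(text)-1):
--         smtext=text[i:i+2]
--         word=text[i]
--         if word in smdict:
--             bigdict=smdict[word]
--             if smtext in bigdict:
--                 bigdict[smtext]+=1
--             else:
--                 bigdict[smtext]=1
--         else:
--             smdict[word]={smtext:1}
--     return smdict
-- ===== SOURCE B (Python) =====
-- def listtags(text, smdict):
--     # Pass 1: flat frequency table of all consecutive bigrams.
--     cnt = {}
--     for i in range(len(text) - 1):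
--         bg = text[i:i + 2]
--         cnt[bg] = cnt.get(bg, 0) + 1
--     # Pass 2: fold the flat table into the nested dict, grouped by first char.
--     for bg, c in cnt.items():
--         bd = smdict.setdefault(bg[0], {})
--         bd[bg] = bd.get(bg, 0) + c
--     return smdict
-- ===== Notes on version B (the rewrite author's own statement) =====
-- stated objective: alternative
-- what changed: B separates counting from assembly: a first pass builds a flat frequency table of all consecutive bigrams, and a second pass over the distinct bigrams folds that table into the nested per-first-character dict, instead of A's single scan that updates the nested dict once per character position.
import Mathlib
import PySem

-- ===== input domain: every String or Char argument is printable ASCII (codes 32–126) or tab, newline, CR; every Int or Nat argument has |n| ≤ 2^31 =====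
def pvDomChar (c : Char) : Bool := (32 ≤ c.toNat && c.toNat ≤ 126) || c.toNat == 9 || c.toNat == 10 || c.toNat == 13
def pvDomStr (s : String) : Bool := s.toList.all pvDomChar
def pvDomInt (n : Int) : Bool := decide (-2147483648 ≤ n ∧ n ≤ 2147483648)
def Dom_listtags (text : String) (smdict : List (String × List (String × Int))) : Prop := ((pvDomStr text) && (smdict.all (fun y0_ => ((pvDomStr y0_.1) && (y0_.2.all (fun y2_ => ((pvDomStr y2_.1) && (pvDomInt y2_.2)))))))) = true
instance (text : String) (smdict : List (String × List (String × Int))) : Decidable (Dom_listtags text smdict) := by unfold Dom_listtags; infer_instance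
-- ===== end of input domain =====

-- B recounts the same nested bigram table in two passes (flat bigram counter, then grouped
-- assembly over the distinct bigrams) instead of A's single interleaved nested-dict scan;
-- equivalence is about the returned value (both Pythons also mutate smdict in place alike).

-- ===== PORT A =====
-- Python dicts are PySem.Dict; the List arguments/results are converted at the boundary.
def listtagsLoopA (text : String) (d0 : PySem.Dict String (PySem.Dict String Int)) :
    PySem.Dict String (PySem.Dict String Int) :=
  (PySem.List.pyRange 0 (PySem.Str.len text - 1) 1).foldl (fun d i =>
    let smtext := PySem.Str.slice text (some i) (some (i + 2))
    match PySem.Str.pyGet? text i with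
    | none => d        -- unreachable: i is always in range here
    | some ch =>
      let word := String.singleton ch
      match d.get? word with
      | some bigdict =>
        match bigdict.get? smtext with
        | some v => d.insert word (bigdict.insert smtext (v + 1))
        | none => d.insert word (bigdict.insert smtext 1)
      | none => d.insert word (PySem.Dict.ofList [(smtext, 1)])) d0

def listtags (text : String) (smdict : List (String × List (String × Int))) :
    List (String × List (String × Int)) :=
  ((listtagsLoopA text
      (PySem.Dict.ofList (smdict.map (fun p => (p.1, PySem.Dict.ofList p.2))))).items).map
    (fun p => (p.1, p.2.items))

-- ===== PORT B =====
-- pass 1: flat counter of all consecutive bigrams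
def listtagsCntB (text : String) : PySem.Dict String Int :=
  (PySem.List.pyRange 0 (PySem.Str.len text - 1) 1).foldl (fun c i =>
    let bg := PySem.Str.slice text (some i) (some (i + 2))
    c.insert bg (c.getD bg 0 + 1)) PySem.Dict.empty

-- pass 2: fold the counter items into the nested dict, grouped by first character
def listtagsMergeB (cnt : PySem.Dict String Int)
    (d0 : PySem.Dict String (PySem.Dict String Int)) :
    PySem.Dict String (PySem.Dict String Int) :=
  cnt.items.foldl (fun d p =>
    match PySem.Str.pyGet? p.1 0 with
    | none => d       -- unreachable: every counted bigram is nonempty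
    | some ch =>
      let w := String.singleton ch
      let bd := d.getD w PySem.Dict.empty
      d.insert w (bd.insert p.1 (bd.getD p.1 0 + p.2))) d0

def listtags_alt (text : String) (smdict : List (String × List (String × Int))) :
    List (String × List (String × Int)) :=
  ((listtagsMergeB (listtagsCntB text)
      (PySem.Dict.ofList (smdict.map (fun p => (p.1, PySem.Dict.ofList p.2))))).items).map
    (fun p => (p.1, p.2.items))

-- ===== PRECONDITION & SPEC =====
def Spec_listtags (text : String) (smdict : List (String × List (String × Int))) (out : List (String × List (String × Int))) : Prop := out = listtags_alt text smdict
instance (text : String) (smdict : List (String × List (String × Int))) (out : List (String × List (String × Int))) : Decidable (Spec_listtags text smdict out) := by unfold Spec_listtags; infer_instance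

-- ===== CLAIM (what is proved, stated in full; the proofs are below) =====
def Claim_equal_listtags : Prop := ∀ (text : String) (smdict : List (String × List (String × Int))), Dom_listtags text smdict → Spec_listtags text smdict (listtags text smdict)

-- ===== LEMMAS AND PROOFS =====

lemma pvProj {κ ν α : Type} [BEq κ] [LawfulBEq κ] (l : List α) (key : α → κ)
    (g : ν → α → ν) (dflt : ν) (d : PySem.Dict κ ν) (w : κ) :
    (l.foldl (fun d x => d.insert (key x) (g (d.getD (key x) dflt) x)) d).getD w dflt
      = (l.filter (fun x => key x == w)).foldl g (d.getD w dflt) := by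
  induction l generalizing d with
  | nil => rfl
  | cons a l ih =>
    simp only [List.foldl_cons, List.filter_cons]
    by_cases h : key a = w
    · subst h
      rw [ih, PySem.Dict.getD_insert_self, if_pos (by simp), List.foldl_cons]
    · rw [ih, PySem.Dict.getD_insert_of_ne _ _ _ (Ne.symm h), if_neg (by simp [h])]

lemma pvSum {κ : Type} [BEq κ] [LawfulBEq κ] (M : List (κ × Int)) (bd : PySem.Dict κ Int)
    (x : κ) :
    (M.foldl (fun bd p => bd.insert p.1 (bd.getD p.1 0 + p.2)) bd).getD x 0
      = bd.getD x 0 + ((M.filter (fun p => p.1 == x)).map (fun p => p.2)).sum := by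
  induction M generalizing bd with
  | nil => simp
  | cons a M ih =>
    simp only [List.foldl_cons, List.filter_cons, ih]
    by_cases h : a.1 = x
    · subst h
      simp [PySem.Dict.getD_insert_self]
      ring
    · rw [PySem.Dict.getD_insert_of_ne _ _ _ (Ne.symm h)]
      simp [h]

lemma pvOfListMap {α β : Type} [BEq α] [LawfulBEq α] [BEq β] [LawfulBEq β]
    (f : α → β) (l : List α) :
    PySem.Set.ofList ((PySem.Set.ofList l).map f) = PySem.Set.ofList (l.map f) := by
  induction l using List.reverseRecOn with
  | nil => rfl
  | append_singleton l x ih =>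
    rw [PySem.Set.ofList_append_singleton]
    by_cases h : x ∈ PySem.Set.ofList l
    · rw [PySem.Set.add_of_mem h, ih, List.map_append]
      simp only [List.map_cons, List.map_nil]
      rw [PySem.Set.ofList_append_singleton]
      have : f x ∈ PySem.Set.ofList (l.map f) := by
        rw [PySem.Set.mem_ofList]
        exact List.mem_map_of_mem ((PySem.Set.mem_ofList l x).mp h)
      rw [PySem.Set.add_of_mem this]
    · rw [PySem.Set.add_of_not_mem h, List.map_append]
      simp only [List.map_cons, List.map_nil]
      rw [PySem.Set.ofList_append_singleton, ih, List.map_append]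
      simp only [List.map_cons, List.map_nil]
      rw [PySem.Set.ofList_append_singleton]

lemma pvUpdateMap {α β : Type} [BEq α] [LawfulBEq α] [BEq β] [LawfulBEq β]
    (s : PySem.Set β) (f : α → β) (l : List α) :
    PySem.Set.update s ((PySem.Set.ofList l).map f) = PySem.Set.update s (l.map f) := by
  rw [PySem.Set.update_eq_append_filter, PySem.Set.update_eq_append_filter, pvOfListMap]

lemma pvFilterOfList {α : Type} [BEq α] [LawfulBEq α] (p : α → Bool) (l : List α) :
    (PySem.Set.ofList l).filter p = PySem.Set.ofList (l.filter p) := by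
  induction l using List.reverseRecOn with
  | nil => rfl
  | append_singleton l x ih =>
    rw [PySem.Set.ofList_append_singleton, List.filter_append]
    by_cases h : x ∈ PySem.Set.ofList l
    · rw [PySem.Set.add_of_mem h]
      by_cases hp : p x
      · simp only [List.filter_cons, hp, if_pos, List.filter_nil]
        rw [ih, PySem.Set.ofList_append_singleton]
        have : x ∈ PySem.Set.ofList (l.filter p) := by
          rw [PySem.Set.mem_ofList, List.mem_filter]
          exact ⟨(PySem.Set.mem_ofList l x).mp h, hp⟩
        rw [PySem.Set.add_of_mem this]
      · simp only [List.filter_cons, hp]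
        simp only [Bool.false_eq_true, if_neg, List.filter_nil, List.append_nil] at *
        rw [ih]
        simp [List.filter_cons, hp]
    · rw [PySem.Set.add_of_not_mem h, List.filter_append, ih]
      by_cases hp : p x
      · simp only [List.filter_cons, hp, if_true, List.filter_nil]
        rw [PySem.Set.ofList_append_singleton]
        have hx : x ∉ PySem.Set.ofList (l.filter p) := by
          rw [PySem.Set.mem_ofList, List.mem_filter]
          rw [PySem.Set.mem_ofList] at h
          tauto
        rw [PySem.Set.add_of_not_mem hx]
      · simp [List.filter_cons, hp]

lemma pvCore {κ : Type} [BEq κ] [LawfulBEq κ] (L : List κ) (bd0 : PySem.Dict κ Int)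
    (h : bd0.keys.Nodup) :
    L.foldl (fun bd bg => bd.insert bg (bd.getD bg 0 + 1)) bd0
      = ((PySem.Set.ofList L).map (fun bg => (bg, (L.count bg : Int)))).foldl
          (fun bd p => bd.insert p.1 (bd.getD p.1 0 + p.2)) bd0 := by
  have hnd1 : (L.foldl (fun bd bg => bd.insert bg (bd.getD bg 0 + 1)) bd0).keys.Nodup :=
    PySem.Dict.nodup_keys_foldl_insert L (fun bd bg => bd.getD bg 0 + 1) bd0 h
  have hnd2 : (((PySem.Set.ofList L).map (fun bg => (bg, (L.count bg : Int)))).foldl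
      (fun bd p => bd.insert p.1 (bd.getD p.1 0 + p.2)) bd0).keys.Nodup :=
    PySem.Dict.nodup_keys_foldl_insert_key
      ((PySem.Set.ofList L).map (fun bg => (bg, (L.count bg : Int))))
      (fun p => p.1) (fun bd p => bd.getD p.1 0 + p.2) bd0 h
  have hkeys : (L.foldl (fun bd bg => bd.insert bg (bd.getD bg 0 + 1)) bd0).keys
      = (((PySem.Set.ofList L).map (fun bg => (bg, (L.count bg : Int)))).foldl
          (fun bd p => bd.insert p.1 (bd.getD p.1 0 + p.2)) bd0).keys := by
    rw [PySem.Dict.keys_foldl_insert, PySem.Dict.keys_foldl_insert_key]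
    have hmap : List.map (fun (p : κ × Int) => p.1)
        ((PySem.Set.ofList L).map (fun bg => (bg, (L.count bg : Int))))
        = PySem.Set.ofList L := by
      simp [List.map_map, Function.comp_def]
    rw [hmap]
    have := pvUpdateMap (bd0.keys) (id : κ → κ) L
    simpa using this.symm
  have hgetD : ∀ x, (L.foldl (fun bd bg => bd.insert bg (bd.getD bg 0 + 1)) bd0).getD x 0
      = (((PySem.Set.ofList L).map (fun bg => (bg, (L.count bg : Int)))).foldl
          (fun bd p => bd.insert p.1 (bd.getD p.1 0 + p.2)) bd0).getD x 0 := by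
    intro x
    rw [PySem.Dict.getD_foldl_insert_add_one, pvSum, List.filter_map]
    have hcomp : ((fun (p : κ × Int) => p.1 == x) ∘ (fun bg => (bg, (L.count bg : Int))))
        = fun bg => bg == x := rfl
    rw [hcomp, List.filter_beq, List.Nodup.count (PySem.Set.nodup_ofList L)]
    by_cases hx : x ∈ L
    · rw [if_pos ((PySem.Set.mem_ofList L x).mpr hx)]
      simp
    · rw [if_neg (fun hc => hx ((PySem.Set.mem_ofList L x).mp hc))]
      simp [List.count_eq_zero.mpr hx]
  apply PySem.Dict.ext
  rw [PySem.Dict.items_eq_map_keys _ hnd1 (0 : Int),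
      PySem.Dict.items_eq_map_keys _ hnd2 (0 : Int), hkeys]
  apply List.map_congr_left
  intro k _
  rw [hgetD k]

lemma pvValues {κ ν : Type} [BEq κ] [LawfulBEq κ] (ps : List (κ × ν))
    (d : PySem.Dict κ ν) (v : ν) (hv : v ∈ (d.update ps).values) :
    v ∈ d.values ∨ v ∈ ps.map (fun p => p.2) := by
  induction ps generalizing d with
  | nil => simp [PySem.Dict.update] at hv; exact Or.inl hv
  | cons p ps ih =>
    simp only [PySem.Dict.update, List.foldl_cons] at hv
    rcases ih (d.insert p.1 p.2) hv with h | h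
    · rcases PySem.Dict.mem_values_insert d p.1 p.2 v h with h' | h'
      · exact Or.inr (by simp [h'])
      · exact Or.inl h'
    · exact Or.inr (by simp; right; simpa using h)

lemma pvInnerNodup (smdict : List (String × List (String × Int))) (w : String) :
    ((PySem.Dict.ofList (smdict.map (fun p => (p.1, PySem.Dict.ofList p.2)))).getD w
        PySem.Dict.empty).keys.Nodup := by
  cases hget : (PySem.Dict.ofList (smdict.map (fun p => (p.1, PySem.Dict.ofList p.2)))).get? w with
  | none =>
    rw [PySem.Dict.getD_of_get?_eq_none _ _ hget]
    simp [PySem.Dict.keys_empty]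
  | some bd =>
    rw [PySem.Dict.getD_of_get?_eq_some _ _ hget]
    have hmem := PySem.Dict.mem_items_of_get?_eq_some _ hget
    have hval : bd ∈ (PySem.Dict.ofList (smdict.map (fun p => (p.1, PySem.Dict.ofList p.2)))).values := by
      simp only [PySem.Dict.values]
      exact List.mem_map_of_mem hmem
    rcases pvValues (smdict.map (fun p => (p.1, PySem.Dict.ofList p.2))) PySem.Dict.empty bd
        (by simpa [PySem.Dict.ofList] using hval) with h | h
    · simp [PySem.Dict.empty, PySem.Dict.values] at h
    · simp only [List.map_map, List.mem_map] at h
      obtain ⟨p, _, hp⟩ := h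
      rw [← hp]
      exact PySem.Dict.nodup_keys_ofList _

def pvWordOf (bg : String) : String :=
  match bg.toList with
  | [] => ""
  | c :: _ => String.singleton c

lemma pvMain (L : List String) (D0 : PySem.Dict String (PySem.Dict String Int))
    (h1 : D0.keys.Nodup)
    (h2 : ∀ w, (D0.getD w PySem.Dict.empty).keys.Nodup) :
    L.foldl (fun d bg => d.insert (pvWordOf bg)
        ((d.getD (pvWordOf bg) PySem.Dict.empty).insert bg
          ((d.getD (pvWordOf bg) PySem.Dict.empty).getD bg 0 + 1))) D0
      = ((PySem.Dict.counter L).items).foldl (fun d p => d.insert (pvWordOf p.1)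
          ((d.getD (pvWordOf p.1) PySem.Dict.empty).insert p.1
            ((d.getD (pvWordOf p.1) PySem.Dict.empty).getD p.1 0 + p.2))) D0 := by
  have hitems := PySem.Dict.items_counter L
  have hnd1 := PySem.Dict.nodup_keys_foldl_insert_key L pvWordOf
    (fun d bg => (d.getD (pvWordOf bg) PySem.Dict.empty).insert bg
      ((d.getD (pvWordOf bg) PySem.Dict.empty).getD bg 0 + 1)) D0 h1
  have hnd2 := PySem.Dict.nodup_keys_foldl_insert_key ((PySem.Dict.counter L).items)
    (fun p => pvWordOf p.1)
    (fun d p => (d.getD (pvWordOf p.1) PySem.Dict.empty).insert p.1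
      ((d.getD (pvWordOf p.1) PySem.Dict.empty).getD p.1 0 + p.2)) D0 h1
  beta_reduce at hnd1 hnd2
  have hkeys1 := PySem.Dict.keys_foldl_insert_key L pvWordOf
    (fun d bg => (d.getD (pvWordOf bg) PySem.Dict.empty).insert bg
      ((d.getD (pvWordOf bg) PySem.Dict.empty).getD bg 0 + 1)) D0
  have hkeys2 := PySem.Dict.keys_foldl_insert_key ((PySem.Dict.counter L).items)
    (fun p => pvWordOf p.1)
    (fun d p => (d.getD (pvWordOf p.1) PySem.Dict.empty).insert p.1
      ((d.getD (pvWordOf p.1) PySem.Dict.empty).getD p.1 0 + p.2)) D0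
  beta_reduce at hkeys1 hkeys2
  have hkeys : (L.foldl (fun d bg => d.insert (pvWordOf bg)
        ((d.getD (pvWordOf bg) PySem.Dict.empty).insert bg
          ((d.getD (pvWordOf bg) PySem.Dict.empty).getD bg 0 + 1))) D0).keys
      = (((PySem.Dict.counter L).items).foldl (fun d p => d.insert (pvWordOf p.1)
          ((d.getD (pvWordOf p.1) PySem.Dict.empty).insert p.1
            ((d.getD (pvWordOf p.1) PySem.Dict.empty).getD p.1 0 + p.2))) D0).keys := by
    rw [hkeys1, hkeys2, hitems, List.map_map]
    have hcomp : ((fun (p : String × Int) => pvWordOf p.1)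
        ∘ (fun k => (k, (L.count k : Int)))) = pvWordOf := rfl
    rw [hcomp, pvUpdateMap]
  have hgetD : ∀ w, (L.foldl (fun d bg => d.insert (pvWordOf bg)
        ((d.getD (pvWordOf bg) PySem.Dict.empty).insert bg
          ((d.getD (pvWordOf bg) PySem.Dict.empty).getD bg 0 + 1))) D0).getD w PySem.Dict.empty
      = (((PySem.Dict.counter L).items).foldl (fun d p => d.insert (pvWordOf p.1)
          ((d.getD (pvWordOf p.1) PySem.Dict.empty).insert p.1
            ((d.getD (pvWordOf p.1) PySem.Dict.empty).getD p.1 0 + p.2))) D0).getD w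
              PySem.Dict.empty := by
    intro w
    have hp1 := pvProj L pvWordOf
      (fun bd bg => bd.insert bg (bd.getD bg 0 + 1)) PySem.Dict.empty D0 w
    have hp2 := pvProj ((PySem.Dict.counter L).items) (fun p => pvWordOf p.1)
      (fun bd p => bd.insert p.1 (bd.getD p.1 0 + p.2)) PySem.Dict.empty D0 w
    beta_reduce at hp1 hp2
    rw [hp1, hp2, hitems, List.filter_map]
    have hcomp : ((fun (p : String × Int) => pvWordOf p.1 == w)
        ∘ (fun k => (k, (L.count k : Int)))) = fun bg => pvWordOf bg == w := rfl
    rw [hcomp, pvFilterOfList]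
    have hcnt : (PySem.Set.ofList (L.filter (fun bg => pvWordOf bg == w))).map
          (fun k => (k, (L.count k : Int)))
        = (PySem.Set.ofList (L.filter (fun bg => pvWordOf bg == w))).map
          (fun k => (k, ((L.filter (fun bg => pvWordOf bg == w)).count k : Int))) := by
      apply List.map_congr_left
      intro bg hbg
      rw [PySem.Set.mem_ofList, List.mem_filter] at hbg
      rw [List.count_filter (p := fun bg => pvWordOf bg == w) (a := bg) (l := L) hbg.2]
    rw [hcnt]
    exact pvCore (L.filter (fun bg => pvWordOf bg == w)) (D0.getD w PySem.Dict.empty) (h2 w)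
  apply PySem.Dict.ext
  rw [PySem.Dict.items_eq_map_keys _ hnd1 PySem.Dict.empty,
      PySem.Dict.items_eq_map_keys _ hnd2 PySem.Dict.empty, hkeys]
  apply List.map_congr_left
  intro k _
  rw [hgetD k]

def pvBigrams (text : String) : List String :=
  (PySem.List.pyRange 0 (PySem.Str.len text - 1) 1).map
    (fun i => PySem.Str.slice text (some i) (some (i + 2)))

lemma pvBigram_toList (text : String) (i : Int) (h0 : 0 ≤ i)
    (h1 : i < (text.toList.length : Int) - 1) :
    (PySem.Str.slice text (some i) (some (i + 2))).toList
      = text.toList[i.toNat]'(by omega)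
        :: (text.toList.drop (i.toNat + 1)).take 1 := by
  have hlt : i.toNat < text.toList.length := by omega
  have h2 : (0:Int) ≤ i + 2 := by omega
  simp only [PySem.Str.slice]
  have hsl : PySem.Chars.slice text.toList (some i) (some (i + 2))
      = (text.toList.drop i.toNat).take ((i+2).toNat - i.toNat) := by
    exact PySem.List.slice_toNat text.toList h0 h2
  have htn : (i + 2).toNat - i.toNat = 2 := by omega
  rw [show (String.ofList (PySem.Chars.slice text.toList (some i) (some (i + 2)))).toList
      = PySem.Chars.slice text.toList (some i) (some (i + 2)) by simp, hsl, htn,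
    List.drop_eq_getElem_cons hlt]
  rfl


lemma pvCongrA (text : String) (d0 : PySem.Dict String (PySem.Dict String Int)) :
    listtagsLoopA text d0 = (pvBigrams text).foldl (fun d bg => d.insert (pvWordOf bg)
        ((d.getD (pvWordOf bg) PySem.Dict.empty).insert bg
          ((d.getD (pvWordOf bg) PySem.Dict.empty).getD bg 0 + 1))) d0 := by
  unfold listtagsLoopA pvBigrams
  rw [List.foldl_map]
  apply PySem.List.foldl_congr_mem
  intro d i hi
  rw [PySem.List.mem_pyRange_one] at hi
  have hlen := PySem.Str.len_eq text
  have h0 : 0 ≤ i := hi.1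
  have h1 : i < (text.toList.length : Int) - 1 := by
    have := hi.2; rw [hlen] at this; omega
  have hlt : i.toNat < text.toList.length := by omega
  have hbg := pvBigram_toList text i h0 h1
  have hget : PySem.Str.pyGet? text i = some (text.toList[i.toNat]'hlt) := by
    rw [PySem.Str.pyGet?_eq,
      show PySem.Chars.pyGet? text.toList i = PySem.List.pyGet? text.toList i from rfl,
      PySem.List.pyGet?_of_nonneg _ h0]
    exact List.getElem?_eq_getElem hlt
  have hw : pvWordOf (PySem.Str.slice text (some i) (some (i + 2)))
      = String.singleton (text.toList[i.toNat]'hlt) := by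
    simp [pvWordOf, hbg]
  simp only [hget, hw]
  cases hob : d.get? (String.singleton (text.toList[i.toNat]'hlt)) with
  | some bigdict =>
    rw [PySem.Dict.getD_of_get?_eq_some _ _ hob]
    dsimp only
    cases hib : bigdict.get? (PySem.Str.slice text (some i) (some (i + 2))) with
    | some v => dsimp only; rw [PySem.Dict.getD_of_get?_eq_some _ _ hib]
    | none => dsimp only; rw [PySem.Dict.getD_of_get?_eq_none _ _ hib]; norm_num
  | none =>
    dsimp only
    simp [PySem.Dict.getD_of_get?_eq_none _ _ hob]
    rfl



lemma pvCntB (text : String) : listtagsCntB text = PySem.Dict.counter (pvBigrams text) := by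
  unfold listtagsCntB pvBigrams
  rw [← PySem.Dict.foldl_insert_getD_add_one_eq_counter, List.foldl_map]

lemma pvMemBigrams (text : String) (bg : String) (h : bg ∈ pvBigrams text) :
    ∃ c r, bg.toList = c :: r := by
  unfold pvBigrams at h
  obtain ⟨i, hi, rfl⟩ := List.mem_map.mp h
  rw [PySem.List.mem_pyRange_one] at hi
  have hlen := PySem.Str.len_eq text
  have h1 : i < (text.toList.length : Int) - 1 := by
    have := hi.2; rw [hlen] at this; omega
  exact ⟨_, _, pvBigram_toList text i hi.1 h1⟩

lemma pvCongrB (text : String) (d0 : PySem.Dict String (PySem.Dict String Int)) :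
    listtagsMergeB (listtagsCntB text) d0
      = ((PySem.Dict.counter (pvBigrams text)).items).foldl (fun d p =>
          d.insert (pvWordOf p.1)
            ((d.getD (pvWordOf p.1) PySem.Dict.empty).insert p.1
              ((d.getD (pvWordOf p.1) PySem.Dict.empty).getD p.1 0 + p.2))) d0 := by
  unfold listtagsMergeB
  rw [pvCntB]
  apply PySem.List.foldl_congr_mem
  intro d p hp
  have hbg : p.1 ∈ pvBigrams text := by
    rw [PySem.Dict.items_counter] at hp
    obtain ⟨k, hk, rfl⟩ := List.mem_map.mp hp
    exact (PySem.Set.mem_ofList _ _).mp hk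
  obtain ⟨c, r, hc⟩ := pvMemBigrams text p.1 hbg
  have hget : PySem.Str.pyGet? p.1 0 = some c := by
    rw [show (0 : Int) = ((0 : Nat) : Int) from rfl, PySem.Str.pyGet?_natCast, hc]
    rfl
  have hw : pvWordOf p.1 = String.singleton c := by simp [pvWordOf, hc]
  rw [hget, hw]

-- ===== VERDICT (by name: the statement is the Claim_ definition above) =====
theorem listtags_spec : Claim_equal_listtags := by
  intro text smdict _
  unfold Spec_listtags listtags listtags_alt
  rw [pvCongrA, pvCongrB,
    pvMain (pvBigrams text) _ (PySem.Dict.nodup_keys_ofList _) (pvInnerNodup smdict)]
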